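-- pv_equiv track=rewrite | github.com/samymateru/Samwel | core/utils.py | determine_priority_stage
-- ===== SOURCE A (Python) =====
-- def determine_priority_stage(stage: str) -> str:
--     # Define your priority order
--     priority = [
--         "Administration",
--         "Planning",
--         "Fieldwork",
--         "Reporting",
--         "Finalization",
--     ]
--
--     if stage == "Pending":
--         return "Pending"
--
--     # Split the stage string into individual names
--     stages = [s.strip() for s in stage.split(",")]
--
--     # Find the one with the highest priority (last in order)
--     for p in reversed(priority):
--         if p in stages:
--             return p
--
--     return "Pending"  # fallback
-- ===== SOURCE B (Python) =====
-- def determine_priority_stage(stage: str) -> str: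
--     priority = [
--         "Administration",
--         "Planning",
--         "Fieldwork",
--         "Reporting",
--         "Finalization",
--     ]
--
--     if stage == "Pending":
--         return "Pending"
--
--     rank = {name: i for i, name in enumerate(priority)}
--
--     best, best_idx = "Pending", -1
--     for s in stage.split(","):
--         s = s.strip()
--         r = rank.get(s, -1)
--         if r > best_idx:
--             best, best_idx = s, r
--     return best
-- ===== Notes on version B (the rewrite author's own statement) =====
-- stated objective: alternative
-- what changed: Instead of scanning the fixed priority list from highest to lowest with a membership test against the parsed stages, B makes one pass over the parsed stages keeping the stage of maximum rank looked up in a precomputed rank dictionary.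
import Mathlib
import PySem

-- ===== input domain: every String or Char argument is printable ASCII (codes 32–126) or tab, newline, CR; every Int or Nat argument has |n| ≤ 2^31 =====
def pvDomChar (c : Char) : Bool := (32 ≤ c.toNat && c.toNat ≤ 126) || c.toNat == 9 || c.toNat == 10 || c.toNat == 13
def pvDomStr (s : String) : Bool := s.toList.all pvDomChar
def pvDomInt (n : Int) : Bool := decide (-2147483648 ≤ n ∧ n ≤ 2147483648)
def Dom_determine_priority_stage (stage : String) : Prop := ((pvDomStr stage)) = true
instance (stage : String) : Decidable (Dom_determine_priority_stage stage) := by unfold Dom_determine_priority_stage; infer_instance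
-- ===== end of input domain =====

-- B replaces A's scan over the fixed priority list (with a membership test per priority) by one pass
-- over the parsed input keeping the max-rank stage via a rank dictionary; same return value (objective: alternative).

-- ===== PORT A =====
-- for p in reversed(priority): if p in stages: return p  /  return "Pending"
def pvALoop : List String → List String → String
  | [], _ => "Pending"
  | p :: ps, stages => if p ∈ stages then p else pvALoop ps stages

def determine_priority_stage (stage : String) : String :=
  let priority := ["Administration", "Planning", "Fieldwork", "Reporting", "Finalization"]
  if stage = "Pending" then "Pending"
  else
    let stages := ((PySem.Str.split? stage ",").getD []).map PySem.Str.strip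
    pvALoop priority.reverse stages

-- ===== PORT B =====
-- rank = {name: i for i, name in enumerate(priority)}
def pvRank : PySem.Dict String Int :=
  (PySem.List.enumerate ["Administration", "Planning", "Fieldwork", "Reporting", "Finalization"]).foldl
    (fun d p => d.insert p.2 p.1) PySem.Dict.empty

-- loop body: s = s.strip(); r = rank.get(s, -1); if r > best_idx: best, best_idx = s, r
def pvBStep (acc : String × Int) (raw : String) : String × Int :=
  let s := PySem.Str.strip raw
  let r := pvRank.getD s (-1)
  if acc.2 < r then (s, r) else acc

def determine_priority_stage_alt (stage : String) : String :=
  if stage = "Pending" then "Pending"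
  else (((PySem.Str.split? stage ",").getD []).foldl pvBStep ("Pending", -1)).1

-- ===== PRECONDITION & SPEC =====
def Spec_determine_priority_stage (stage : String) (out : String) : Prop := out = determine_priority_stage_alt stage
instance (stage : String) (out : String) : Decidable (Spec_determine_priority_stage stage out) := by unfold Spec_determine_priority_stage; infer_instance

-- ===== CLAIM (what is proved, stated in full; the proofs are below) =====
def Claim_equal_determine_priority_stage : Prop := ∀ (stage : String), Dom_determine_priority_stage stage → Spec_determine_priority_stage stage (determine_priority_stage stage)

-- ===== LEMMAS AND PROOFS =====

-- the priority name of a rank (-1 ↦ the "Pending" fallback)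
def pvNm (i : Int) : String :=
  if i = 4 then "Finalization" else if i = 3 then "Reporting" else if i = 2 then "Fieldwork"
  else if i = 1 then "Planning" else if i = 0 then "Administration" else "Pending"

-- the max rank reached by the raw pieces xs, starting from i
def pvM (xs : List String) (i : Int) : Int :=
  xs.foldl (fun a s => max a (pvRank.getD (PySem.Str.strip s) (-1))) i

lemma pvRank_items : pvRank = PySem.Dict.mk
    [("Administration", 0), ("Planning", 1), ("Fieldwork", 2), ("Reporting", 3), ("Finalization", 4)] := by
  rfl

lemma pvRank_char (s : String) :
    pvRank.getD s (-1) = -1 ∨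
      (0 ≤ pvRank.getD s (-1) ∧ pvRank.getD s (-1) ≤ 4 ∧ pvNm (pvRank.getD s (-1)) = s) := by
  rw [pvRank_items]
  by_cases h0 : s = "Administration"
  · subst h0; right; decide
  by_cases h1 : s = "Planning"
  · subst h1; right; decide
  by_cases h2 : s = "Fieldwork"
  · subst h2; right; decide
  by_cases h3 : s = "Reporting"
  · subst h3; right; decide
  by_cases h4 : s = "Finalization"
  · subst h4; right; decide
  · left
    have e0 : (("Administration" : String) == s) = false := beq_eq_false_iff_ne.mpr (fun h => h0 h.symm)
    have e1 : (("Planning" : String) == s) = false := beq_eq_false_iff_ne.mpr (fun h => h1 h.symm)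
    have e2 : (("Fieldwork" : String) == s) = false := beq_eq_false_iff_ne.mpr (fun h => h2 h.symm)
    have e3 : (("Reporting" : String) == s) = false := beq_eq_false_iff_ne.mpr (fun h => h3 h.symm)
    have e4 : (("Finalization" : String) == s) = false := beq_eq_false_iff_ne.mpr (fun h => h4 h.symm)
    simp [PySem.Dict.getD, PySem.Dict.get?, List.find?, e0, e1, e2, e3, e4]


lemma pvRank_val0 : pvRank.getD "Administration" (-1) = 0 := by rw [pvRank_items]; decide
lemma pvRank_val1 : pvRank.getD "Planning" (-1) = 1 := by rw [pvRank_items]; decide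
lemma pvRank_val2 : pvRank.getD "Fieldwork" (-1) = 2 := by rw [pvRank_items]; decide
lemma pvRank_val3 : pvRank.getD "Reporting" (-1) = 3 := by rw [pvRank_items]; decide
lemma pvRank_val4 : pvRank.getD "Finalization" (-1) = 4 := by rw [pvRank_items]; decide

lemma pvM_eq_foldl_max (xs : List String) (i : Int) :
    pvM xs i = (xs.map (fun s => pvRank.getD (PySem.Str.strip s) (-1))).foldl max i := by
  simp [pvM, List.foldl_map]

lemma pvM_le (xs : List String) (i k : Int) (hi : i ≤ k)
    (h : ∀ s ∈ xs, pvRank.getD (PySem.Str.strip s) (-1) ≤ k) : pvM xs i ≤ k := by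
  induction xs generalizing i with
  | nil => simpa [pvM] using hi
  | cons x xs ih =>
    simp only [pvM, List.foldl_cons]
    exact ih _ (by
      have := h x (by simp)
      exact max_le hi this) (fun s hs => h s (by simp [hs]))

lemma pvM_ge_init (xs : List String) (i : Int) : i ≤ pvM xs i := by
  rw [pvM_eq_foldl_max]
  exact (PySem.List.le_foldl_max _ i).1

lemma pvM_ge_mem (xs : List String) (i : Int) (x : String) (hx : x ∈ xs) :
    pvRank.getD (PySem.Str.strip x) (-1) ≤ pvM xs i := by
  rw [pvM_eq_foldl_max]
  exact (PySem.List.le_foldl_max _ i).2 _ (List.mem_map_of_mem hx)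

-- B's fold computes the name of the max rank
lemma pvM_cons (x : String) (xs : List String) (i : Int) :
    pvM (x :: xs) i = pvM xs (max i (pvRank.getD (PySem.Str.strip x) (-1))) := rfl

lemma pvFold_eq (xs : List String) (i : Int) (hlo : -1 ≤ i) (hhi : i ≤ 4) :
    (xs.foldl pvBStep (pvNm i, i)).1 = pvNm (pvM xs i) := by
  induction xs generalizing i with
  | nil => simp [pvM]
  | cons x xs ih =>
    rw [List.foldl_cons, pvM_cons]
    rcases pvRank_char (PySem.Str.strip x) with h | ⟨h0, h4, hn⟩
    · have hstep : pvBStep (pvNm i, i) x = (pvNm i, i) := by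
        simp only [pvBStep, h]
        have : ¬ (i < -1) := by omega
        simp [this]
      rw [hstep]
      have hmax : max i (pvRank.getD (PySem.Str.strip x) (-1)) = i := by omega
      rw [hmax]
      exact ih i hlo hhi
    · by_cases hlt : i < pvRank.getD (PySem.Str.strip x) (-1)
      · have hstep : pvBStep (pvNm i, i) x
            = (pvNm (pvRank.getD (PySem.Str.strip x) (-1)), pvRank.getD (PySem.Str.strip x) (-1)) := by
          simp only [pvBStep, hlt, if_true, hn]
        rw [hstep]
        have hmax : max i (pvRank.getD (PySem.Str.strip x) (-1)) = pvRank.getD (PySem.Str.strip x) (-1) := by omega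
        rw [hmax]
        exact ih _ (by omega) h4
      · have hstep : pvBStep (pvNm i, i) x = (pvNm i, i) := by
          simp only [pvBStep, hlt, if_false]
        rw [hstep]
        have hmax : max i (pvRank.getD (PySem.Str.strip x) (-1)) = i := by omega
        rw [hmax]
        exact ih i hlo hhi

-- A's scan over reversed priority also computes the name of the max rank
lemma pvALoop_eq (xs : List String) :
    pvALoop (["Administration", "Planning", "Fieldwork", "Reporting", "Finalization"]).reverse
      (xs.map PySem.Str.strip) = pvNm (pvM xs (-1)) := by
  have hub : ∀ (k : Int), (∀ s ∈ xs, pvRank.getD (PySem.Str.strip s) (-1) ≤ k) → -1 ≤ k → pvM xs (-1) ≤ k :=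
    fun k h hk => pvM_le xs (-1) k hk h
  have hmem : ∀ (n : String), n ∈ xs.map PySem.Str.strip ↔ ∃ x ∈ xs, PySem.Str.strip x = n := by
    simp
  have hrank : ∀ (x : String) (r : Int), 0 ≤ r → r ≤ 4 →
      pvRank.getD (PySem.Str.strip x) (-1) = r → PySem.Str.strip x = pvNm r := by
    intro x r h0 h4 hr
    rcases pvRank_char (PySem.Str.strip x) with h | ⟨_, _, hn⟩
    · omega
    · rw [← hr, hn]
  -- helper: if pvM = r then the name is in the stripped list (for r ≥ 0)
  simp only [List.reverse_cons, List.reverse_nil, List.nil_append, List.cons_append, pvALoop]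
  by_cases h4 : "Finalization" ∈ xs.map PySem.Str.strip
  · obtain ⟨x, hx, hsx⟩ := (hmem _).1 h4
    have hr : pvRank.getD (PySem.Str.strip x) (-1) = 4 := hsx ▸ pvRank_val4
    have hge : (4 : Int) ≤ pvM xs (-1) := by have h := pvM_ge_mem xs (-1) x hx; omega
    have hle : pvM xs (-1) ≤ 4 := hub 4 (fun s _ => by
      rcases pvRank_char (PySem.Str.strip s) with h | ⟨_, h', _⟩ <;> omega) (by omega)
    have : pvM xs (-1) = 4 := le_antisymm hle hge
    simp [h4, this, pvNm]
  · have hn4 : ∀ s ∈ xs, pvRank.getD (PySem.Str.strip s) (-1) ≤ 3 := by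
      intro s hs
      rcases pvRank_char (PySem.Str.strip s) with h | ⟨h0, hle, hn⟩
      · omega
      · by_contra hc
        have : pvRank.getD (PySem.Str.strip s) (-1) = 4 := by omega
        exact h4 ((hmem _).2 ⟨s, hs, by rw [hrank s 4 (by omega) le_rfl this]; rfl⟩)
    by_cases h3 : "Reporting" ∈ xs.map PySem.Str.strip
    · obtain ⟨x, hx, hsx⟩ := (hmem _).1 h3
      have hr : pvRank.getD (PySem.Str.strip x) (-1) = 3 := hsx ▸ pvRank_val3
      have hge : (3 : Int) ≤ pvM xs (-1) := by have h := pvM_ge_mem xs (-1) x hx; omega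
      have hle : pvM xs (-1) ≤ 3 := hub 3 hn4 (by omega)
      have : pvM xs (-1) = 3 := le_antisymm hle hge
      simp [h4, h3, this, pvNm]
    · have hn3 : ∀ s ∈ xs, pvRank.getD (PySem.Str.strip s) (-1) ≤ 2 := by
        intro s hs
        have := hn4 s hs
        by_contra hc
        have h' : pvRank.getD (PySem.Str.strip s) (-1) = 3 := by omega
        exact h3 ((hmem _).2 ⟨s, hs, by rw [hrank s 3 (by omega) (by omega) h']; rfl⟩)
      by_cases h2 : "Fieldwork" ∈ xs.map PySem.Str.strip
      · obtain ⟨x, hx, hsx⟩ := (hmem _).1 h2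
        have hr : pvRank.getD (PySem.Str.strip x) (-1) = 2 := hsx ▸ pvRank_val2
        have hge : (2 : Int) ≤ pvM xs (-1) := by have h := pvM_ge_mem xs (-1) x hx; omega
        have hle : pvM xs (-1) ≤ 2 := hub 2 hn3 (by omega)
        have : pvM xs (-1) = 2 := le_antisymm hle hge
        simp [h4, h3, h2, this, pvNm]
      · have hn2 : ∀ s ∈ xs, pvRank.getD (PySem.Str.strip s) (-1) ≤ 1 := by
          intro s hs
          have := hn3 s hs
          by_contra hc
          have h' : pvRank.getD (PySem.Str.strip s) (-1) = 2 := by omega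
          exact h2 ((hmem _).2 ⟨s, hs, by rw [hrank s 2 (by omega) (by omega) h']; rfl⟩)
        by_cases h1 : "Planning" ∈ xs.map PySem.Str.strip
        · obtain ⟨x, hx, hsx⟩ := (hmem _).1 h1
          have hr : pvRank.getD (PySem.Str.strip x) (-1) = 1 := hsx ▸ pvRank_val1
          have hge : (1 : Int) ≤ pvM xs (-1) := by have h := pvM_ge_mem xs (-1) x hx; omega
          have hle : pvM xs (-1) ≤ 1 := hub 1 hn2 (by omega)
          have : pvM xs (-1) = 1 := le_antisymm hle hge
          simp [h4, h3, h2, h1, this, pvNm]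
        · have hn1 : ∀ s ∈ xs, pvRank.getD (PySem.Str.strip s) (-1) ≤ 0 := by
            intro s hs
            have := hn2 s hs
            by_contra hc
            have h' : pvRank.getD (PySem.Str.strip s) (-1) = 1 := by omega
            exact h1 ((hmem _).2 ⟨s, hs, by rw [hrank s 1 (by omega) (by omega) h']; rfl⟩)
          by_cases h0 : "Administration" ∈ xs.map PySem.Str.strip
          · obtain ⟨x, hx, hsx⟩ := (hmem _).1 h0
            have hr : pvRank.getD (PySem.Str.strip x) (-1) = 0 := hsx ▸ pvRank_val0
            have hge : (0 : Int) ≤ pvM xs (-1) := by have h := pvM_ge_mem xs (-1) x hx; omega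
            have hle : pvM xs (-1) ≤ 0 := hub 0 hn1 (by omega)
            have : pvM xs (-1) = 0 := le_antisymm hle hge
            simp [h4, h3, h2, h1, h0, this, pvNm]
          · have hn0 : ∀ s ∈ xs, pvRank.getD (PySem.Str.strip s) (-1) ≤ -1 := by
              intro s hs
              have := hn1 s hs
              by_contra hc
              have h' : pvRank.getD (PySem.Str.strip s) (-1) = 0 := by omega
              exact h0 ((hmem _).2 ⟨s, hs, by rw [hrank s 0 le_rfl (by omega) h']; rfl⟩)
            have hle : pvM xs (-1) ≤ -1 := hub (-1) hn0 le_rfl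
            have hge := pvM_ge_init xs (-1)
            have : pvM xs (-1) = -1 := le_antisymm hle hge
            simp [h4, h3, h2, h1, h0, this, pvNm]

-- ===== VERDICT (by name: the statement is the Claim_ definition above) =====
theorem determine_priority_stage_spec : Claim_equal_determine_priority_stage := by
  intro stage _
  unfold Spec_determine_priority_stage determine_priority_stage determine_priority_stage_alt
  by_cases hp : stage = "Pending"
  · simp [hp]
  · simp only [hp, if_false]
    rw [pvALoop_eq ((PySem.Str.split? stage ",").getD [])]
    exact (pvFold_eq ((PySem.Str.split? stage ",").getD []) (-1) le_rfl (by omega)).symm
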